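-- pv_equiv track=rewrite | github.com/ConstMatador/Lab1-2021113189 | a6.py | search_direct_intermediate_nodes
-- ===== SOURCE A (Python) =====
-- def search_direct_intermediate_nodes(graph, start_node, end_node):
--     intermediate_nodes = set()
--     all_nodes = set(graph.keys()) | set(node for edges in graph.values() for node, _ in edges)
--     if start_node not in all_nodes or end_node not in all_nodes:
--         return "没有" + start_node + "或" + end_node
--     if any(neighbor == end_node for neighbor, _ in graph.get(start_node, [])):
--         return start_node + "和" + end_node + "之间没有桥接词"
--     for neighbor, _ in graph.get(start_node, []):
--         if any(next_hop == end_node for next_hop, _ in graph.get(neighbor, [])):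
--             intermediate_nodes.add(neighbor)
--     if not intermediate_nodes:
--         return start_node + "和" + end_node + "之间没有桥接词"
--     return start_node + "和" + end_node + "之间的桥接词是" + ", ".join(intermediate_nodes)
-- ===== SOURCE B (Python) =====
-- def search_direct_intermediate_nodes(graph, start_node, end_node):
--     def mentioned(x):
--         return x in graph or any(n == x for edges in graph.values() for n, _ in edges)
--     if not mentioned(start_node) or not mentioned(end_node):
--         return "没有" + start_node + "或" + end_node
--     header = start_node + "和" + end_node
--     succ = [n for n, _ in graph.get(start_node, [])]
--     if end_node in succ:
--         return header + "之间没有桥接词"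
--     preds = [w for w, edges in graph.items() if any(n == end_node for n, _ in edges)]
--     bridges = [w for w in preds if w in succ]
--     if not bridges:
--         return header + "之间没有桥接词"
--     return header + "之间的桥接词是" + ", ".join(bridges)
-- ===== Notes on version B (the rewrite author's own statement) =====
-- stated objective: alternative
-- what changed: A builds node sets and, for each successor of start, re-looks it up in the dict to test for an edge to end; B uses a linear 'mentioned' scan over the raw items, collects end_node's predecessors in one pass over graph.items(), and keeps those that are successors of start_node as an ordered list.
import Mathlib
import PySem

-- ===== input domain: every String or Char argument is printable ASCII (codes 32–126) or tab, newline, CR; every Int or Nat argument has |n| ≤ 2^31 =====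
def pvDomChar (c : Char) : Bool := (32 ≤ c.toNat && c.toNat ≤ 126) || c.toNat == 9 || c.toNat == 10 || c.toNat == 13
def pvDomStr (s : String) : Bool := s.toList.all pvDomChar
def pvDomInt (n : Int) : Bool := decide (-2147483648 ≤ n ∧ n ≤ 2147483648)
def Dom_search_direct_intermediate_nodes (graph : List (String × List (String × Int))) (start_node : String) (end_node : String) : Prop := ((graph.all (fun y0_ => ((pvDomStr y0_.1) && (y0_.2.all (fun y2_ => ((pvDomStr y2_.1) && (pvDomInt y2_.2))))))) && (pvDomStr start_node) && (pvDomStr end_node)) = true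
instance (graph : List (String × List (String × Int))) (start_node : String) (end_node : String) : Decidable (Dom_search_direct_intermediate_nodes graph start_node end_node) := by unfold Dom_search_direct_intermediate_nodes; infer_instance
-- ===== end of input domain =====

-- B replaces A's set machinery and per-neighbor dict re-lookup by plain linear scans:
-- a membership predicate over the raw items, and bridge words as the ordered list of
-- end_node's predecessors (one pass over graph.items()) kept when they are successors
-- of start_node (alternative decomposition, same cost).

-- ===== PORT A =====
def search_direct_intermediate_nodes (graph : List (String × List (String × Int))) (start_node : String) (end_node : String) : String :=
  -- all_nodes = set(graph.keys()) | set(node for edges in graph.values() for node, _ in edges)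
  let all_nodes : PySem.Set String :=
    PySem.Set.union (PySem.Set.ofList (graph.map (·.1)))
      (PySem.Set.ofList (graph.flatMap (fun p => p.2.map (·.1))))
  if ¬ (all_nodes.contains start_node = true) ∨ ¬ (all_nodes.contains end_node = true) then
    "没有" ++ start_node ++ "或" ++ end_node
  else if ((PySem.Dict.mk graph).getD start_node []).any (fun q => q.1 == end_node) then
    start_node ++ "和" ++ end_node ++ "之间没有桥接词"
  else
    -- for neighbor, _ in graph.get(start_node, []): if any(next_hop == end_node …): add(neighbor)
    let intermediate_nodes : PySem.Set String :=
      ((PySem.Dict.mk graph).getD start_node []).foldl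
        (fun s p =>
          if ((PySem.Dict.mk graph).getD p.1 []).any (fun q => q.1 == end_node) then
            PySem.Set.add s p.1
          else s)
        PySem.Set.empty
    if intermediate_nodes.isEmpty then
      start_node ++ "和" ++ end_node ++ "之间没有桥接词"
    else
      -- ", ".join over a set: exact only when the set has at most one element (see Pre_)
      start_node ++ "和" ++ end_node ++ "之间的桥接词是" ++ PySem.Str.join ", " intermediate_nodes

-- ===== PORT B =====
def search_direct_intermediate_nodes_alt (graph : List (String × List (String × Int))) (start_node : String) (end_node : String) : String :=
  -- mentioned(x) = x in graph or any(n == x for edges in graph.values() for n, _ in edges)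
  let mentioned : String → Bool := fun x =>
    graph.any (fun p => p.1 == x) || graph.any (fun p => p.2.any (fun q => q.1 == x))
  if !(mentioned start_node) || !(mentioned end_node) then
    "没有" ++ start_node ++ "或" ++ end_node
  else
    let header := start_node ++ "和" ++ end_node
    -- succ = [n for n, _ in graph.get(start_node, [])]
    let succ : List String := ((PySem.Dict.mk graph).getD start_node []).map (·.1)
    if succ.contains end_node then
      header ++ "之间没有桥接词"
    else
      -- preds = [w for w, edges in graph.items() if any(n == end_node for n, _ in edges)]
      let preds : List String := (graph.filter (fun p => p.2.any (fun q => q.1 == end_node))).map (·.1)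
      -- bridges = [w for w in preds if w in succ]
      let bridges : List String := preds.filter (fun w => succ.contains w)
      if bridges.isEmpty then
        header ++ "之间没有桥接词"
      else
        header ++ "之间的桥接词是" ++ PySem.Str.join ", " bridges

-- ===== PRECONDITION & SPEC =====
-- Pre_ excludes (a) association lists with duplicate keys, which cannot arise from a Python
-- dict, and (b) inputs whose answer joins two or more bridge words, where A's ", ".join over
-- a Python set emits a hash-seed-dependent order that no port can reproduce (B agrees with A
-- there only up to that accidental order).
def Pre_search_direct_intermediate_nodes (graph : List (String × List (String × Int))) (start_node : String) (end_node : String) : Prop :=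
  (graph.map Prod.fst).Nodup ∧
  (((start_node ∈ graph.map Prod.fst ∨ start_node ∈ graph.flatMap (fun p => p.2.map Prod.fst)) ∧
    (end_node ∈ graph.map Prod.fst ∨ end_node ∈ graph.flatMap (fun p => p.2.map Prod.fst)) ∧
    ¬ (∃ q ∈ (PySem.Dict.mk graph).getD start_node [], q.1 = end_node)) →
   (PySem.List.dedup ((((PySem.Dict.mk graph).getD start_node []).map Prod.fst).filter
      (fun w => ((PySem.Dict.mk graph).getD w []).any (fun q => q.1 == end_node)))).length ≤ 1)
instance (graph : List (String × List (String × Int))) (start_node : String) (end_node : String) : Decidable (Pre_search_direct_intermediate_nodes graph start_node end_node) := by unfold Pre_search_direct_intermediate_nodes; infer_instance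

def pvWitness_search_direct_intermediate_nodes : (List (String × List (String × Int))) × String × String :=
  ([("s", [("a", 1)]), ("a", [("e", 2)]), ("e", [])], "s", "e")

def Spec_search_direct_intermediate_nodes (graph : List (String × List (String × Int))) (start_node : String) (end_node : String) (out : String) : Prop := out = search_direct_intermediate_nodes_alt graph start_node end_node
instance (graph : List (String × List (String × Int))) (start_node : String) (end_node : String) (out : String) : Decidable (Spec_search_direct_intermediate_nodes graph start_node end_node out) := by unfold Spec_search_direct_intermediate_nodes; infer_instance

-- ===== CLAIM (what is proved, stated in full; the proofs are below) =====
def Claim_equal_search_direct_intermediate_nodes : Prop := ∀ (graph : List (String × List (String × Int))) (start_node : String) (end_node : String), Dom_search_direct_intermediate_nodes graph start_node end_node → Pre_search_direct_intermediate_nodes graph start_node end_node → Spec_search_direct_intermediate_nodes graph start_node end_node (search_direct_intermediate_nodes graph start_node end_node)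

-- ===== LEMMAS AND PROOFS =====

-- A's union-of-sets membership test = B's linear 'mentioned' scan
theorem union_contains_eq_mentioned (g : List (String × List (String × Int))) (x : String) :
    (PySem.Set.union (PySem.Set.ofList (g.map (·.1)))
        (PySem.Set.ofList (g.flatMap (fun p => p.2.map (·.1))))).contains x
      = (g.any (fun p => p.1 == x) || g.any (fun p => p.2.any (fun q => q.1 == x))) := by
  rw [Bool.eq_iff_iff]
  simp only [PySem.Set.contains_iff, PySem.Set.mem_union, PySem.Set.mem_ofList,
    List.mem_map, List.mem_flatMap, Bool.or_eq_true, List.any_eq_true, beq_iff_eq]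

-- turns B's guard scan into the membership facts Pre_'s antecedent states
theorem any_to_mem (g : List (String × List (String × Int))) (x : String)
    (h : (g.any (fun p => p.1 == x) || g.any (fun p => p.2.any (fun q => q.1 == x))) = true) :
    x ∈ g.map Prod.fst ∨ x ∈ g.flatMap (fun p => p.2.map Prod.fst) := by
  simp only [Bool.or_eq_true, List.any_eq_true, beq_iff_eq] at h
  rcases h with ⟨p, hp, rfl⟩ | ⟨p, hp, q, hq, rfl⟩
  · exact Or.inl (List.mem_map.mpr ⟨p, hp, rfl⟩)
  · exact Or.inr (List.mem_flatMap.mpr ⟨p, hp, List.mem_map.mpr ⟨q, hq, rfl⟩⟩)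

-- B's succ.contains test = A's direct-edge any-test
theorem contains_map_fst (l : List (String × Int)) (e : String) :
    (l.map (·.1)).contains e = l.any (fun q => q.1 == e) := by
  rw [Bool.eq_iff_iff]
  simp [List.any_eq_true]

-- A's conditional-add loop over edge pairs, as set-of of the filtered neighbor names
theorem foldl_addIf_fst (p : String → Bool) :
    ∀ (l : List (String × Int)) (s : List String),
      l.foldl (fun st q => if p q.1 then PySem.Set.add st q.1 else st) s
        = ((l.map (·.1)).filter p).foldl PySem.Set.add s := by
  intro l
  induction l with
  | nil => intro s; rfl
  | cons x xs ih =>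
    intro s
    by_cases hx : p x.1 = true <;> simp [hx, ih]

-- A's per-neighbor dict lookup condition holds exactly for members of B's preds list
theorem cond_iff_mem_preds (g : List (String × List (String × Int))) (e w : String)
    (hnd : (g.map Prod.fst).Nodup) :
    ((PySem.Dict.mk g).getD w []).any (fun q => q.1 == e) = true
      ↔ w ∈ (g.filter (fun p => p.2.any (fun q => q.1 == e))).map (·.1) := by
  simp only [List.mem_map, List.mem_filter]
  simp only [PySem.Dict.getD, PySem.Dict.get?]
  rcases hfind : List.find? (fun p => p.1 == w) g with _ | ⟨k, es⟩
  · simp only [hfind]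
    rw [List.find?_eq_none] at hfind
    constructor
    · intro h; simp at h
    · rintro ⟨p, ⟨hp, hany⟩, rfl⟩
      exact absurd (by simp) (hfind p hp)
  · have hk : k = w := by
      have := List.find?_some hfind
      simpa using this
    subst hk
    have hmem := List.mem_of_find?_eq_some hfind
    simp only [hfind, Option.map_some, Option.getD_some]
    constructor
    · intro h
      exact ⟨(k, es), ⟨hmem, h⟩, rfl⟩
    · rintro ⟨p, ⟨hp, hany⟩, hfst⟩
      have : p = (k, es) := List.inj_on_of_nodup_map hnd hp hmem (by simpa using hfst)
      rw [this] at hany; exact hany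

-- a Nodup list whose members all equal x, with x a member, is [x]
theorem nodup_all_eq_singleton {x : String} :
    ∀ (l : List String), l.Nodup → x ∈ l → (∀ y ∈ l, y = x) → l = [x] := by
  intro l hnd hx hall
  cases l with
  | nil => cases hx
  | cons y ys =>
    have hy : y = x := hall y (by simp)
    subst hy
    have hnotin : y ∉ ys := (List.nodup_cons.mp hnd).1
    have : ys = [] := by
      cases hys : ys with
      | nil => rfl
      | cons z zs =>
        have hz : z = y := hall z (by simp [hys])
        exact absurd (by simp [hys, hz]) hnotin
    simp [this]

-- the central identity: A's deduped bridge set, in successor order, equals B's bridges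
-- list, in predecessor order, whenever the deduped set has at most one element
theorem alist_eq_bridges (g : List (String × List (String × Int))) (s e : String)
    (hnd : (g.map Prod.fst).Nodup)
    (hlen : (PySem.List.dedup ((((PySem.Dict.mk g).getD s []).map Prod.fst).filter
        (fun w => ((PySem.Dict.mk g).getD w []).any (fun q => q.1 == e)))).length ≤ 1) :
    PySem.Set.ofList ((((PySem.Dict.mk g).getD s []).map (·.1)).filter
        (fun w => ((PySem.Dict.mk g).getD w []).any (fun q => q.1 == e)))
      = ((g.filter (fun p => p.2.any (fun q => q.1 == e))).map (·.1)).filter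
          (fun w => (((PySem.Dict.mk g).getD s []).map (·.1)).contains w) := by
  set succ : List String := ((PySem.Dict.mk g).getD s []).map (·.1) with hsucc
  set condA : String → Bool := fun w => ((PySem.Dict.mk g).getD w []).any (fun q => q.1 == e)
    with hcond
  set preds : List String := (g.filter (fun p => p.2.any (fun q => q.1 == e))).map (·.1)
    with hpreds
  have halist : PySem.Set.ofList (succ.filter condA) = PySem.List.dedup (succ.filter condA) :=
    (PySem.List.dedup_eq_ofList _).symm
  have hmemA : ∀ x, x ∈ PySem.Set.ofList (succ.filter condA) ↔ x ∈ succ ∧ condA x = true := by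
    intro x; simp [PySem.Set.mem_ofList, List.mem_filter]
  have hmemB : ∀ x, x ∈ preds.filter (fun w => succ.contains w) ↔ x ∈ succ ∧ condA x = true := by
    intro x
    simp only [List.mem_filter, List.contains_iff_mem]
    rw [cond_iff_mem_preds g e x hnd, ← hpreds]
    tauto
  have hndA : (PySem.Set.ofList (succ.filter condA)).Nodup := PySem.Set.nodup_ofList _
  have hndB : (preds.filter (fun w => succ.contains w)).Nodup := by
    have : preds.Nodup := by
      rw [hpreds]
      have hsubl : (g.filter (fun p => p.2.any (fun q => q.1 == e))).Sublist g :=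
        List.filter_sublist
      exact hnd.sublist (hsubl.map Prod.fst)
    exact this.filter _
  have hlen' : (PySem.Set.ofList (succ.filter condA)).length ≤ 1 := by
    rw [halist]
    have : succ = ((PySem.Dict.mk g).getD s []).map Prod.fst := hsucc
    rw [this]; exact hlen
  rcases ha : PySem.Set.ofList (succ.filter condA) with _ | ⟨x, xs⟩
  · symm
    rw [List.eq_nil_iff_forall_not_mem]
    intro x hx
    have := (hmemB x).mp hx
    have := (hmemA x).mpr this
    rw [ha] at this; cases this
  · have hxs : xs = [] := by
      rw [ha] at hlen'
      simp only [List.length_cons] at hlen'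
      exact List.length_eq_zero_iff.mp (by omega)
    subst hxs
    have hxmem : x ∈ succ ∧ condA x = true := (hmemA x).mp (by rw [ha]; simp)
    symm
    apply nodup_all_eq_singleton _ hndB ((hmemB x).mpr hxmem)
    intro y hy
    have := (hmemA y).mpr ((hmemB y).mp hy)
    rw [ha] at this; simpa using this

-- ===== VERDICT (by name: the statement is the Claim_ definition above) =====
theorem search_direct_intermediate_nodes_spec : Claim_equal_search_direct_intermediate_nodes := by
  intro g s e _ hpre
  obtain ⟨hnd, hbound⟩ := hpre
  unfold Spec_search_direct_intermediate_nodes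
  simp only [search_direct_intermediate_nodes, search_direct_intermediate_nodes_alt]
  rw [union_contains_eq_mentioned g s, union_contains_eq_mentioned g e, contains_map_fst]
  cases hms : (g.any (fun p => p.1 == s) || g.any (fun p => p.2.any (fun q => q.1 == s))) with
  | false => simp
  | true =>
    cases hme : (g.any (fun p => p.1 == e) || g.any (fun p => p.2.any (fun q => q.1 == e))) with
    | false => simp
    | true =>
      rw [if_neg (by simp : ¬(¬(true = true) ∨ ¬(true = true))),
          if_neg (by decide : ¬((!true || !true) = true))]
      cases hc2 : ((PySem.Dict.mk g).getD s []).any (fun q => q.1 == e) with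
      | true => simp
      | false =>
        rw [if_neg (by decide : ¬(false = true)), if_neg (by decide : ¬(false = true))]
        -- Pre_'s length bound applies: both nodes are mentioned and there is no direct edge
        have hlen := hbound ⟨any_to_mem g s hms, any_to_mem g e hme, by
          rintro ⟨q, hq, hqe⟩
          have : ((PySem.Dict.mk g).getD s []).any (fun q => q.1 == e) = true :=
            List.any_eq_true.mpr ⟨q, hq, beq_iff_eq.mpr hqe⟩
          rw [hc2] at this; cases this⟩
        rw [foldl_addIf_fst (fun w => ((PySem.Dict.mk g).getD w []).any (fun q => q.1 == e))
          ((PySem.Dict.mk g).getD s []) PySem.Set.empty]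
        have hofl : (((((PySem.Dict.mk g).getD s []).map (·.1)).filter
            (fun w => ((PySem.Dict.mk g).getD w []).any (fun q => q.1 == e))).foldl
              PySem.Set.add PySem.Set.empty)
            = PySem.Set.ofList ((((PySem.Dict.mk g).getD s []).map (·.1)).filter
                (fun w => ((PySem.Dict.mk g).getD w []).any (fun q => q.1 == e))) := rfl
        rw [hofl, alist_eq_bridges g s e hnd hlen]
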